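-- pv_equiv track=rewrite | github.com/Leewongi0731/DailyCodeTest | [프로그래머스 레벨4] 쿠키 구입.py | solution
-- ===== SOURCE A (Python) =====
-- from bisect import bisect_left
--
-- def getDp(l, r, cookie, preSum, dp):
--     if l >= r: return 0
--
--     if dp[l][r] == -1:
--         dp[l][r] = 0
--
--         totalSum = preSum[r] - preSum[l-1]
--         if totalSum % 2 == 0:
--             targetSum = totalSum // 2
--
--             findIndex = bisect_left( preSum, targetSum + preSum[l-1] )
--             if findIndex < len(preSum) and preSum[findIndex] == targetSum + preSum[l-1]:
--                 dp[l][r] = targetSum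
--                 return dp[l][r]
--
--         dp[l][r] = max( getDp(l+1, r, cookie, preSum, dp),
--                        getDp(l, r-1, cookie, preSum, dp) )
--
--     return dp[l][r]
--
-- def solution(cookie):
--     N = len(cookie)
--     preSum = [0]
--     for c in cookie:
--         preSum.append( preSum[-1]+c )
--
--     l, r = 1, N
--     dp = [ [ -1 for i in range(N+1) ] for i in range(N+1) ]
--     answer = getDp( l, r, cookie, preSum, dp)
--     return answer
-- ===== SOURCE B (Python) =====
-- from bisect import bisect_left
--
-- def solution(cookie):
--     N = len(cookie)
--     preSum = [0]
--     for c in cookie: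
--         preSum.append(preSum[-1] + c)
--     dp = [[0] * (N + 1) for _ in range(N + 1)]
--     for length in range(2, N + 1):
--         for l in range(1, N - length + 2):
--             r = l + length - 1
--             total = preSum[r] - preSum[l - 1]
--             if total % 2 == 0:
--                 target = total // 2
--                 j = bisect_left(preSum, target + preSum[l - 1])
--                 if j < len(preSum) and preSum[j] == target + preSum[l - 1]:
--                     dp[l][r] = target
--                     continue
--             dp[l][r] = max(dp[l + 1][r], dp[l][r - 1])
--     return dp[1][N] if N >= 1 else 0
-- ===== Notes on version B (the rewrite author's own statement) =====
-- stated objective: alternative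
-- what changed: Replaces A's top-down memoized recursion (getDp threading a -1-sentinel memo table, recursion depth up to N) by an iterative bottom-up tabulation of the same recurrence over increasing interval lengths; same bisect membership test, no recursion. Trade-off: no deep recursion and no memo checks, but it fills all O(N^2) cells where A's early return can prune.
import Mathlib
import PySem

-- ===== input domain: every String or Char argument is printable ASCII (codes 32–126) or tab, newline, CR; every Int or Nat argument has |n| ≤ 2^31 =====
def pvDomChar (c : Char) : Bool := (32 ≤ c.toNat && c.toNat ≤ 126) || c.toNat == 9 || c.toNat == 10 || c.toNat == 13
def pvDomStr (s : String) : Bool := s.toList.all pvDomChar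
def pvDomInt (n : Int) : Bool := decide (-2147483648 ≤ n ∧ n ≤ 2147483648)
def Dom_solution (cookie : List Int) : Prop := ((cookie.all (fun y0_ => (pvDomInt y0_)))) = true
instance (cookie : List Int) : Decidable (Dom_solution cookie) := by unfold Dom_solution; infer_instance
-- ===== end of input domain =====

-- B replaces A's top-down memoized recursion (recursion depth N, per-call memo checks) by an
-- iterative bottom-up tabulation of the same recurrence; equivalence of the two is proved for ALL inputs.

-- ===== PORT A =====
-- shared helper: the 'preSum' building loop, identical in both Pythons
-- (preSum[-1] is Python's last-element access; the list is never empty, so pyGetD's default is never used)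
def preS (cookie : List Int) : List Int :=
  cookie.foldl (fun P c => P ++ [PySem.List.pyGetD P (-1) 0 + c]) [0]

-- shared helpers for the dp table: dp[l][r] read and write.  Both programs only ever write at
-- indices 0 ≤ l,r ≤ N (in range), where List.set/toNat is exact for Python's dp[l][r] = v.
def dpGet (dp : List (List Int)) (l r : Int) : Int :=
  PySem.List.pyGetD (PySem.List.pyGetD dp l []) r 0

def dpSet (dp : List (List Int)) (l r : Int) (v : Int) : List (List Int) :=
  dp.set l.toNat ((PySem.List.pyGetD dp l []).set r.toNat v)

-- literal port of A's getDp: memoized recursion, the memo table threaded through as state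
def getDp : Nat → Int → Int → List Int → List Int → List (List Int) → Int × List (List Int)
  -- the Nat argument is a fuel bound making the recursion structural; every call keeps
  -- fuel > (r - l).toNat, so the fuel-exhausted equation is never reached
  | 0, _, _, _, _, dp => (0, dp)
  | fuel + 1, l, r, cookie, preSum, dp =>
    if _h0 : l ≥ r then (0, dp)
    else if dpGet dp l r = -1 then
      let dp1 := dpSet dp l r 0
      let totalSum := PySem.List.pyGetD preSum r 0 - PySem.List.pyGetD preSum (l - 1) 0
      if PySem.Int.mod totalSum 2 = 0 then
        let targetSum := PySem.Int.floordiv totalSum 2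
        let findIndex := PySem.List.bisectLeft preSum (targetSum + PySem.List.pyGetD preSum (l - 1) 0)
        if findIndex < preSum.length ∧
            PySem.List.pyGetD preSum (findIndex : Int) 0 = targetSum + PySem.List.pyGetD preSum (l - 1) 0 then
          (targetSum, dpSet dp1 l r targetSum)
        else
          -- fall-through: dp[l][r] = max(getDp(l+1,r,…), getDp(l,r-1,…)); return dp[l][r]
          let p1 := getDp fuel (l + 1) r cookie preSum dp1
          let p2 := getDp fuel l (r - 1) cookie preSum p1.2
          (max p1.1 p2.1, dpSet p2.2 l r (max p1.1 p2.1))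
      else
        let p1 := getDp fuel (l + 1) r cookie preSum dp1
        let p2 := getDp fuel l (r - 1) cookie preSum p1.2
        (max p1.1 p2.1, dpSet p2.2 l r (max p1.1 p2.1))
    else (dpGet dp l r, dp)

def solution (cookie : List Int) : Int :=
  let N : Int := cookie.length
  let preSum := preS cookie
  let dp := (PySem.List.pyRange 0 (N + 1)).map
    (fun _ => (PySem.List.pyRange 0 (N + 1)).map (fun _ => (-1 : Int)))
  (getDp (cookie.length + 1) 1 N cookie preSum dp).1

-- ===== PORT B =====
-- bottom-up tabulation: one cell of the table filled in (the body of Source B's inner loop)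
def altStep (preSum : List Int) (len : Int) (dp : List (List Int)) (l : Int) : List (List Int) :=
  let r := l + len - 1
  let total := PySem.List.pyGetD preSum r 0 - PySem.List.pyGetD preSum (l - 1) 0
  if PySem.Int.mod total 2 = 0 then
    let target := PySem.Int.floordiv total 2
    let j := PySem.List.bisectLeft preSum (target + PySem.List.pyGetD preSum (l - 1) 0)
    if j < preSum.length ∧
        PySem.List.pyGetD preSum (j : Int) 0 = target + PySem.List.pyGetD preSum (l - 1) 0 then
      dpSet dp l r target
    else
      dpSet dp l r (max (dpGet dp (l + 1) r) (dpGet dp l (r - 1)))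
  else
    dpSet dp l r (max (dpGet dp (l + 1) r) (dpGet dp l (r - 1)))

-- Source B's inner 'for l in range(1, N - length + 2)' loop
def altRow (preSum : List Int) (N : Int) (dp : List (List Int)) (len : Int) : List (List Int) :=
  (PySem.List.pyRange 1 (N - len + 2)).foldl (altStep preSum len) dp

def solution_alt (cookie : List Int) : Int :=
  let N : Int := cookie.length
  let preSum := preS cookie
  let dp0 := (PySem.List.pyRange 0 (N + 1)).map (fun _ => PySem.List.pyRepeat [(0 : Int)] (N + 1))
  let dp := (PySem.List.pyRange 2 (N + 1)).foldl (altRow preSum N) dp0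
  if N ≥ 1 then dpGet dp 1 N else 0

-- ===== PRECONDITION & SPEC =====
def Spec_solution (cookie : List Int) (out : Int) : Prop := out = solution_alt cookie
instance (cookie : List Int) (out : Int) : Decidable (Spec_solution cookie out) := by unfold Spec_solution; infer_instance

-- ===== CLAIM (what is proved, stated in full; the proofs are below) =====
def Claim_equal_solution : Prop := ∀ (cookie : List Int), Dom_solution cookie → Spec_solution cookie (solution cookie)

-- ===== LEMMAS AND PROOFS =====

-- the pure recurrence both programs tabulate: gDp preSum l r is the value dp[l][r] ends up with
def gDp (preSum : List Int) (l r : Int) : Int :=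
  if l ≥ r then 0
  else
    let totalSum := PySem.List.pyGetD preSum r 0 - PySem.List.pyGetD preSum (l - 1) 0
    if PySem.Int.mod totalSum 2 = 0 ∧
        (PySem.List.bisectLeft preSum (PySem.Int.floordiv totalSum 2 + PySem.List.pyGetD preSum (l - 1) 0) < preSum.length ∧
         PySem.List.pyGetD preSum ((PySem.List.bisectLeft preSum (PySem.Int.floordiv totalSum 2 + PySem.List.pyGetD preSum (l - 1) 0) : Nat) : Int) 0 =
           PySem.Int.floordiv totalSum 2 + PySem.List.pyGetD preSum (l - 1) 0) then
      PySem.Int.floordiv totalSum 2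
    else max (gDp preSum (l + 1) r) (gDp preSum l (r - 1))
termination_by (r - l).toNat
decreasing_by
  · omega
  · omega

def ShapeT (N : Nat) (dp : List (List Int)) : Prop :=
  dp.length = N + 1 ∧ ∀ row ∈ dp, row.length = N + 1

lemma gDp_base (preSum : List Int) {l r : Int} (h : l ≥ r) : gDp preSum l r = 0 := by
  unfold gDp; simp [h]

lemma pyGetD_in {α : Type} (xs : List α) (i : Int) (d : α) (h0 : 0 ≤ i) (h : i.toNat < xs.length) :
    PySem.List.pyGetD xs i d = xs[i.toNat] := by
  rw [PySem.List.pyGetD_of_nonneg xs d h0]; exact List.getD_eq_getElem xs d h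

lemma pyGetD_out {α : Type} (xs : List α) (i : Int) (d : α) (h0 : 0 ≤ i) (h : xs.length ≤ i.toNat) :
    PySem.List.pyGetD xs i d = d := by
  rw [PySem.List.pyGetD_of_nonneg xs d h0]; exact List.getD_eq_default xs d h

lemma pyGetD_default_or_mem {α : Type} (xs : List α) (i : Int) (d : α) :
    PySem.List.pyGetD xs i d = d ∨ PySem.List.pyGetD xs i d ∈ xs := by
  by_cases h : PySem.Raise.InRange xs.length i
  · exact Or.inr (PySem.List.pyGetD_mem xs d h)
  · left
    apply PySem.List.pyGetD_of_none
    simp only [PySem.Raise.InRange] at h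
    simp [PySem.List.pyGet?, PySem.List.pyIdx?]
    intro a; split_ifs <;> simp <;> omega

lemma pyRange_zero_len (n : Nat) :
    PySem.List.pyRange 0 ((n : Int) + 1) = (List.range (n+1)).map (Nat.cast : Nat → Int) := by
  have h : ((n:Int)+1) = ((n+1 : Nat) : Int) := by push_cast; ring
  rw [h, PySem.List.pyRange_zero_natCast]

lemma dpSet_shape {N : Nat} {dp : List (List Int)} (l r : Int) (v : Int)
    (h : ShapeT N dp) (hl0 : 0 ≤ l) (hl : l.toNat < dp.length) :
    ShapeT N (dpSet dp l r v) := by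
  obtain ⟨h1, h2⟩ := h
  constructor
  · simp [dpSet, h1]
  · intro row hrow
    rcases List.mem_or_eq_of_mem_set hrow with h' | h'
    · exact h2 row h'
    · subst h'
      rw [List.length_set]
      rw [pyGetD_in dp l [] hl0 hl]
      exact h2 _ (List.getElem_mem hl)

lemma dpGet_dpSet_self {N : Nat} {dp : List (List Int)} (l r : Int) (v : Int)
    (h : ShapeT N dp) (hl1 : 1 ≤ l) (hlN : l ≤ (N : Int)) (hr1 : 1 ≤ r) (hrN : r ≤ (N : Int)) :
    dpGet (dpSet dp l r v) l r = v := by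
  obtain ⟨h1, h2⟩ := h
  have hl : l.toNat < dp.length := by omega
  have hrow : (PySem.List.pyGetD dp l []).length = N + 1 := by
    rw [pyGetD_in dp l [] (by omega) hl]
    exact h2 _ (List.getElem_mem hl)
  have hr : r.toNat < (PySem.List.pyGetD dp l []).length := by omega
  unfold dpGet dpSet
  rw [pyGetD_in _ l [] (by omega) (by simpa using hl)]
  rw [List.getElem_set_self]
  rw [pyGetD_in _ r 0 (by omega) (by simpa using hr)]
  exact List.getElem_set_self _

lemma dpGet_dpSet_ne {dp : List (List Int)} (l r : Int) (v : Int) (a b : Int)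
    (hl : 1 ≤ l) (hr : 1 ≤ r) (ha : 1 ≤ a) (hb : 1 ≤ b) (hne : ¬(a = l ∧ b = r)) :
    dpGet (dpSet dp l r v) a b = dpGet dp a b := by
  by_cases hal : a = l
  · subst hal
    have hbr : b ≠ r := by tauto
    have hbt : b.toNat ≠ r.toNat := by omega
    by_cases hin : a.toNat < dp.length
    · unfold dpGet dpSet
      rw [pyGetD_in _ a [] (by omega) (by simpa using hin)]
      rw [List.getElem_set_self]
      rw [pyGetD_in dp a [] (by omega) hin]
      by_cases hbin : b.toNat < (dp[a.toNat].set r.toNat v).length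
      · rw [pyGetD_in _ b 0 (by omega) hbin]
        rw [List.getElem_set_ne (by omega)]
        rw [pyGetD_in _ b 0 (by omega) (by simpa using hbin)]
      · rw [pyGetD_out _ b 0 (by omega) (by omega)]
        rw [pyGetD_out _ b 0 (by omega) (by simp at hbin ⊢; omega)]
    · unfold dpGet dpSet
      rw [List.set_eq_of_length_le (by omega)]
  · have hat : a.toNat ≠ l.toNat := by omega
    unfold dpGet dpSet
    by_cases hin : a.toNat < dp.length
    · rw [pyGetD_in _ a [] (by omega) (by simpa using hin)]
      rw [List.getElem_set_ne (by omega)]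
      rw [pyGetD_in dp a [] (by omega) hin]
    · rw [pyGetD_out _ a [] (by omega) (by simpa using hin)]
      rw [pyGetD_out dp a [] (by omega) (by omega)]

-- ===== A-side: the memoized recursion computes gDp =====
lemma getDp_ok (N : Nat) (cookie preSum : List Int) :
    ∀ (fuel k : Nat) (l r : Int) (dp : List (List Int)),
      (r - l).toNat = k → k < fuel →
      1 ≤ l → l ≤ (N : Int) → 1 ≤ r → r ≤ (N : Int) →
      ShapeT N dp →
      (dpGet dp l r = -1 ∨ dpGet dp l r = gDp preSum l r) →
      (∀ a b : Int, 1 ≤ a → a ≤ (N : Int) → 1 ≤ b → b ≤ (N : Int) → (b - a).toNat < k →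
          dpGet dp a b = -1 ∨ dpGet dp a b = gDp preSum a b) →
      (getDp fuel l r cookie preSum dp).1 = gDp preSum l r ∧
      ShapeT N (getDp fuel l r cookie preSum dp).2 ∧
      (∀ a b : Int, 1 ≤ a → a ≤ (N : Int) → 1 ≤ b → b ≤ (N : Int) →
          dpGet (getDp fuel l r cookie preSum dp).2 a b = dpGet dp a b ∨
          dpGet (getDp fuel l r cookie preSum dp).2 a b = gDp preSum a b) := by
  intro fuel
  induction fuel with
  | zero => intro k l r dp hk hfuel; exact absurd hfuel (by omega)
  | succ f IH =>
  intro k l r dp hk hfuel hl1 hlN hr1 hrN hshape hown hinv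
  by_cases h0 : l ≥ r
  · rw [getDp, dif_pos h0]
    exact ⟨(gDp_base preSum h0).symm, hshape, fun a b _ _ _ _ => Or.inl rfl⟩
  · have hlt : l < r := by omega
    by_cases hmemo : dpGet dp l r = -1
    · -- memo miss: compute
      have hsh1 : ShapeT N (dpSet dp l r 0) := by
        apply dpSet_shape _ _ _ hshape (by omega)
        have := hshape.1; omega
      have hne1 : ∀ a b : Int, 1 ≤ a → 1 ≤ b → ¬(a = l ∧ b = r) →
          dpGet (dpSet dp l r 0) a b = dpGet dp a b := by
        intro a b ha hb hne
        exact dpGet_dpSet_ne l r 0 a b hl1 hr1 ha hb hne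
      -- recursive results (used in the fall-through branches)
      have H1 := IH ((r - (l+1)).toNat) (l+1) r (dpSet dp l r 0) rfl (by omega)
        (by omega) (by omega) hr1 hrN hsh1
        (by
          rw [hne1 (l+1) r (by omega) (by omega) (by intro h; omega)]
          exact hinv (l+1) r (by omega) (by omega) hr1 hrN (by omega))
        (by
          intro a b ha1 haN hb1 hbN hgap
          rw [hne1 a b ha1 hb1 (by intro h; omega)]
          exact hinv a b ha1 haN hb1 hbN (by omega))
      obtain ⟨hv1, hsh2, hpost1⟩ := H1
      have H2 := IH ((r - 1 - l).toNat) l (r-1)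
        ((getDp f (l+1) r cookie preSum (dpSet dp l r 0)).2) (by omega) (by omega)
        hl1 hlN (by omega) (by omega) hsh2
        (by
          rcases hpost1 l (r-1) hl1 hlN (by omega) (by omega) with h | h
          · rw [h, hne1 l (r-1) hl1 (by omega) (by intro h'; omega)]
            exact hinv l (r-1) hl1 hlN (by omega) (by omega) (by omega)
          · exact Or.inr h)
        (by
          intro a b ha1 haN hb1 hbN hgap
          rcases hpost1 a b ha1 haN hb1 hbN with h | h
          · rw [h, hne1 a b ha1 hb1 (by intro h'; omega)]
            exact hinv a b ha1 haN hb1 hbN (by omega)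
          · exact Or.inr h)
      obtain ⟨hv2, hsh3, hpost2⟩ := H2
      -- a name for the fall-through result
      have hfall :
          ∀ (dpf : List (List Int)), dpf = (getDp f l (r-1) cookie preSum
              ((getDp f (l+1) r cookie preSum (dpSet dp l r 0)).2)).2 →
          ∀ (m : Int), m = gDp preSum l r →
          (m = gDp preSum l r ∧ ShapeT N (dpSet dpf l r m) ∧
            (∀ a b : Int, 1 ≤ a → a ≤ (N : Int) → 1 ≤ b → b ≤ (N : Int) →
              dpGet (dpSet dpf l r m) a b = dpGet dp a b ∨
              dpGet (dpSet dpf l r m) a b = gDp preSum a b)) := by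
        intro dpf hdpf m hm
        subst hdpf
        refine ⟨hm, ?_, ?_⟩
        · apply dpSet_shape _ _ _ hsh3 (by omega)
          have := hsh3.1; omega
        · intro a b ha1 haN hb1 hbN
          by_cases hab : a = l ∧ b = r
          · right
            obtain ⟨ha, hb⟩ := hab; subst ha; subst hb
            rw [dpGet_dpSet_self _ _ _ hsh3 hl1 hlN hr1 hrN, hm]
          · rw [dpGet_dpSet_ne l r m a b hl1 hr1 ha1 hb1 hab]
            rcases hpost2 a b ha1 haN hb1 hbN with h | h
            · rcases hpost1 a b ha1 haN hb1 hbN with h' | h'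
              · rw [h, h']
                by_cases hab2 : a = l ∧ b = r
                · exact absurd hab2 hab
                · rw [hne1 a b ha1 hb1 hab2]; left; rfl
              · rw [h, h']; right; rfl
            · right; exact h
      have hfall2 :
          ∀ (m : Int), m = gDp preSum l r →
          ((m, dpSet ((getDp f l (r-1) cookie preSum
              ((getDp f (l+1) r cookie preSum (dpSet dp l r 0)).2)).2) l r m).1 = gDp preSum l r ∧
            ShapeT N (m, dpSet ((getDp f l (r-1) cookie preSum
              ((getDp f (l+1) r cookie preSum (dpSet dp l r 0)).2)).2) l r m).2 ∧
            (∀ a b : Int, 1 ≤ a → a ≤ (N : Int) → 1 ≤ b → b ≤ (N : Int) →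
              dpGet (m, dpSet ((getDp f l (r-1) cookie preSum
                ((getDp f (l+1) r cookie preSum (dpSet dp l r 0)).2)).2) l r m).2 a b = dpGet dp a b ∨
              dpGet (m, dpSet ((getDp f l (r-1) cookie preSum
                ((getDp f (l+1) r cookie preSum (dpSet dp l r 0)).2)).2) l r m).2 a b = gDp preSum a b)) := by
        intro m hm
        exact hfall _ rfl m hm
      rw [getDp, dif_neg h0, if_pos hmemo]
      by_cases hc1 : PySem.Int.mod (PySem.List.pyGetD preSum r 0 - PySem.List.pyGetD preSum (l - 1) 0) 2 = 0
      · rw [if_pos hc1]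
        by_cases hc2 : PySem.List.bisectLeft preSum (PySem.Int.floordiv (PySem.List.pyGetD preSum r 0 - PySem.List.pyGetD preSum (l - 1) 0) 2 + PySem.List.pyGetD preSum (l - 1) 0) < preSum.length ∧
            PySem.List.pyGetD preSum ((PySem.List.bisectLeft preSum (PySem.Int.floordiv (PySem.List.pyGetD preSum r 0 - PySem.List.pyGetD preSum (l - 1) 0) 2 + PySem.List.pyGetD preSum (l - 1) 0) : Nat) : Int) 0 =
              PySem.Int.floordiv (PySem.List.pyGetD preSum r 0 - PySem.List.pyGetD preSum (l - 1) 0) 2 + PySem.List.pyGetD preSum (l - 1) 0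
        · rw [if_pos hc2]
          have hgood : gDp preSum l r = PySem.Int.floordiv (PySem.List.pyGetD preSum r 0 - PySem.List.pyGetD preSum (l - 1) 0) 2 := by
            rw [gDp, if_neg h0, if_pos ⟨hc1, hc2⟩]
          refine ⟨hgood.symm, ?_, ?_⟩
          · apply dpSet_shape _ _ _ hsh1 (by omega)
            have := hsh1.1; omega
          · intro a b ha1 haN hb1 hbN
            by_cases hab : a = l ∧ b = r
            · right
              obtain ⟨ha, hb⟩ := hab; subst ha; subst hb
              rw [dpGet_dpSet_self _ _ _ hsh1 hl1 hlN hr1 hrN, hgood]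
            · rw [dpGet_dpSet_ne l r _ a b hl1 hr1 ha1 hb1 hab,
                  hne1 a b ha1 hb1 hab]
              left; rfl
        · rw [if_neg hc2]
          have hbad : gDp preSum l r = max (gDp preSum (l + 1) r) (gDp preSum l (r - 1)) := by
            rw [gDp, if_neg h0, if_neg (by tauto)]
          exact hfall2 _ (by rw [hv1, hv2, hbad])
      · rw [if_neg hc1]
        have hbad : gDp preSum l r = max (gDp preSum (l + 1) r) (gDp preSum l (r - 1)) := by
          rw [gDp, if_neg h0, if_neg (by tauto)]
        exact hfall2 _ (by rw [hv1, hv2, hbad])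
    · -- memo hit
      rcases hown with h | h
      · exact absurd h hmemo
      · rw [getDp, dif_neg h0, if_neg hmemo]
        exact ⟨h, hshape, fun a b _ _ _ _ => Or.inl rfl⟩

-- initial table of A: (N+1)×(N+1), all cells -1
lemma initA_props (N : Nat) :
    ShapeT N ((PySem.List.pyRange 0 ((N : Int) + 1)).map
        (fun _ => (PySem.List.pyRange 0 ((N : Int) + 1)).map (fun _ => (-1 : Int)))) ∧
    (∀ a b : Int, 1 ≤ a → a ≤ (N : Int) → 1 ≤ b → b ≤ (N : Int) →
        dpGet ((PySem.List.pyRange 0 ((N : Int) + 1)).map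
          (fun _ => (PySem.List.pyRange 0 ((N : Int) + 1)).map (fun _ => (-1 : Int)))) a b = -1) := by
  rw [pyRange_zero_len]
  constructor
  · constructor
    · simp
    · intro row hrow
      simp only [List.mem_map] at hrow
      obtain ⟨x, _, hx⟩ := hrow
      simp [← hx]
  · intro a b ha1 haN hb1 hbN
    unfold dpGet
    rw [pyGetD_in _ a [] (by omega) (by simp; omega)]
    rw [List.getElem_map]
    rw [pyGetD_in _ b 0 (by omega) (by simp; omega)]
    simp

lemma solution_eq_g (cookie : List Int) :
    solution cookie = gDp (preS cookie) 1 (cookie.length : Int) := by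
  obtain ⟨hsh, hcell⟩ := initA_props cookie.length
  simp only [solution]
  by_cases hN : cookie.length = 0
  · rw [hN]
    rw [getDp, dif_pos (by norm_num)]
    rw [gDp_base _ (by norm_num)]
  · have h1 : (1 : Int) ≤ (cookie.length : Int) := by omega
    exact (getDp_ok cookie.length cookie (preS cookie) (cookie.length + 1) (((cookie.length : Int)) - 1).toNat
      1 (cookie.length : Int) _ (by omega) (by omega) le_rfl h1 h1 le_rfl hsh
      (Or.inl (hcell 1 (cookie.length : Int) le_rfl h1 h1 le_rfl))
      (fun a b ha1 haN hb1 hbN _ => Or.inl (hcell a b ha1 haN hb1 hbN))).1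

-- ===== B-side: the bottom-up tabulation computes gDp =====
lemma inner_ok (preSum : List Int) (N : Nat) (len : Int) (hlen2 : 2 ≤ len) (_hlenN : len ≤ (N : Int)) :
    ∀ (k : Nat) (l0 : Int) (dp : List (List Int)),
      (((N : Int) - len + 2) - l0).toNat = k → 1 ≤ l0 →
      ShapeT N dp →
      (∀ a b : Int, 1 ≤ a → a ≤ (N : Int) → 1 ≤ b → b ≤ (N : Int) →
          dpGet dp a b =
            (if b - a + 1 < len ∨ (b - a + 1 = len ∧ a < l0) then gDp preSum a b else 0)) →
      ShapeT N ((PySem.List.pyRange l0 ((N : Int) - len + 2)).foldl (altStep preSum len) dp) ∧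
      (∀ a b : Int, 1 ≤ a → a ≤ (N : Int) → 1 ≤ b → b ≤ (N : Int) →
          dpGet ((PySem.List.pyRange l0 ((N : Int) - len + 2)).foldl (altStep preSum len) dp) a b =
            (if b - a + 1 < len ∨ (b - a + 1 = len ∧ a < (N : Int) - len + 2) then gDp preSum a b else 0)) := by
  intro k
  induction k with
  | zero =>
    intro l0 dp hk hl0 hsh hcell
    rw [PySem.List.pyRange_one_eq_nil (by omega)]
    refine ⟨hsh, ?_⟩
    intro a b ha1 haN hb1 hbN
    rw [List.foldl_nil]
    rw [hcell a b ha1 haN hb1 hbN]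
    exact if_congr (by omega) rfl rfl
  | succ n IH =>
    intro l0 dp hk hl0 hsh hcell
    have hlt : l0 < (N : Int) - len + 2 := by omega
    rw [PySem.List.pyRange_one_cons hlt, List.foldl_cons]
    -- bounds for the written cell
    have hr1 : (1 : Int) ≤ l0 + len - 1 := by omega
    have hrN : l0 + len - 1 ≤ (N : Int) := by omega
    have hl0N : l0 ≤ (N : Int) := by omega
    -- the two reads hold the already-computed smaller intervals
    have hread1 : dpGet dp (l0 + 1) (l0 + len - 1) = gDp preSum (l0 + 1) (l0 + len - 1) := by
      rw [hcell (l0 + 1) (l0 + len - 1) (by omega) (by omega) hr1 hrN]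
      rw [if_pos (by omega)]
    have hread2 : dpGet dp l0 (l0 + len - 2) = gDp preSum l0 (l0 + len - 2) := by
      rw [hcell l0 (l0 + len - 2) hl0 hl0N (by omega) (by omega)]
      rw [if_pos (by omega)]
    -- one step writes the correct value of the recurrence
    have hstep : altStep preSum len dp l0 = dpSet dp l0 (l0 + len - 1) (gDp preSum l0 (l0 + len - 1)) := by
      unfold altStep
      by_cases hc1 : PySem.Int.mod (PySem.List.pyGetD preSum (l0 + len - 1) 0 - PySem.List.pyGetD preSum (l0 - 1) 0) 2 = 0
      · rw [if_pos hc1]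
        by_cases hc2 : PySem.List.bisectLeft preSum (PySem.Int.floordiv (PySem.List.pyGetD preSum (l0 + len - 1) 0 - PySem.List.pyGetD preSum (l0 - 1) 0) 2 + PySem.List.pyGetD preSum (l0 - 1) 0) < preSum.length ∧
            PySem.List.pyGetD preSum ((PySem.List.bisectLeft preSum (PySem.Int.floordiv (PySem.List.pyGetD preSum (l0 + len - 1) 0 - PySem.List.pyGetD preSum (l0 - 1) 0) 2 + PySem.List.pyGetD preSum (l0 - 1) 0) : Nat) : Int) 0 =
              PySem.Int.floordiv (PySem.List.pyGetD preSum (l0 + len - 1) 0 - PySem.List.pyGetD preSum (l0 - 1) 0) 2 + PySem.List.pyGetD preSum (l0 - 1) 0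
        · rw [if_pos hc2]
          congr 1
          rw [gDp, if_neg (by omega : ¬ l0 ≥ l0 + len - 1), if_pos ⟨hc1, hc2⟩]
        · rw [if_neg hc2]
          congr 1
          rw [gDp, if_neg (by omega : ¬ l0 ≥ l0 + len - 1), if_neg (by tauto)]
          rw [hread1]
          rw [show l0 + len - 1 - 1 = l0 + len - 2 by ring, hread2]
      · rw [if_neg hc1]
        congr 1
        rw [gDp, if_neg (by omega : ¬ l0 ≥ l0 + len - 1), if_neg (by tauto)]
        rw [hread1]
        rw [show l0 + len - 1 - 1 = l0 + len - 2 by ring, hread2]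
    rw [hstep]
    have hsh' : ShapeT N (dpSet dp l0 (l0 + len - 1) (gDp preSum l0 (l0 + len - 1))) := by
      apply dpSet_shape _ _ _ hsh (by omega)
      have := hsh.1; omega
    exact IH (l0 + 1) _ (by omega) (by omega) hsh'
      (by
        intro a b ha1 haN hb1 hbN
        by_cases hab : a = l0 ∧ b = l0 + len - 1
        · obtain ⟨ha, hb⟩ := hab; subst ha; subst hb
          rw [dpGet_dpSet_self _ _ _ hsh hl0 hl0N hr1 hrN]
          rw [if_pos (by omega)]
        · rw [dpGet_dpSet_ne _ _ _ _ _ hl0 hr1 ha1 hb1 hab]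
          rw [hcell a b ha1 haN hb1 hbN]
          refine if_congr ?_ rfl rfl
          constructor
          · intro h; rcases h with h | h
            · exact Or.inl h
            · exact Or.inr ⟨h.1, by omega⟩
          · intro h; rcases h with h | h
            · exact Or.inl h
            · refine Or.inr ⟨h.1, ?_⟩
              rcases lt_or_ge a l0 with h' | h'
              · exact h'
              · exfalso; exact hab ⟨by omega, by omega⟩)

lemma outer_ok (preSum : List Int) (N : Nat) :
    ∀ (k : Nat) (L0 : Int) (dp : List (List Int)),
      (((N : Int) + 1) - L0).toNat = k → 2 ≤ L0 →
      ShapeT N dp →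
      (∀ a b : Int, 1 ≤ a → a ≤ (N : Int) → 1 ≤ b → b ≤ (N : Int) →
          dpGet dp a b = (if b - a + 1 < L0 then gDp preSum a b else 0)) →
      ShapeT N ((PySem.List.pyRange L0 ((N : Int) + 1)).foldl (altRow preSum N) dp) ∧
      (∀ a b : Int, 1 ≤ a → a ≤ (N : Int) → 1 ≤ b → b ≤ (N : Int) →
          dpGet ((PySem.List.pyRange L0 ((N : Int) + 1)).foldl (altRow preSum N) dp) a b =
            (if b - a + 1 < (N : Int) + 1 then gDp preSum a b else 0)) := by
  intro k
  induction k with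
  | zero =>
    intro L0 dp hk hL0 hsh hcell
    rw [PySem.List.pyRange_one_eq_nil (by omega)]
    refine ⟨hsh, ?_⟩
    intro a b ha1 haN hb1 hbN
    rw [List.foldl_nil]
    rw [hcell a b ha1 haN hb1 hbN]
    exact if_congr (by omega) rfl rfl
  | succ n IH =>
    intro L0 dp hk hL0 hsh hcell
    have hlt : L0 < (N : Int) + 1 := by omega
    rw [PySem.List.pyRange_one_cons hlt]
    rw [List.foldl_cons]
    have hinner := inner_ok preSum N L0 hL0 (by omega) (((N : Int) - L0 + 2) - 1).toNat 1 dp rfl le_rfl hsh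
      (by
        intro a b ha1 haN hb1 hbN
        rw [hcell a b ha1 haN hb1 hbN]
        exact if_congr (by omega) rfl rfl)
    obtain ⟨hsh2, hcell2⟩ := hinner
    exact IH (L0 + 1) (altRow preSum N dp L0) (by omega) (by omega) hsh2
      (by
        intro a b ha1 haN hb1 hbN
        rw [show altRow preSum N dp L0 =
            (PySem.List.pyRange 1 ((N : Int) - L0 + 2)).foldl (altStep preSum L0) dp from rfl]
        rw [hcell2 a b ha1 haN hb1 hbN]
        exact if_congr (by omega) rfl rfl)

-- initial table of B: (N+1)×(N+1), all cells 0 (any access yields 0)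
lemma initB_props (N : Nat) :
    ShapeT N ((PySem.List.pyRange 0 ((N : Int) + 1)).map
        (fun _ => PySem.List.pyRepeat [(0 : Int)] ((N : Int) + 1))) ∧
    (∀ a b : Int,
        dpGet ((PySem.List.pyRange 0 ((N : Int) + 1)).map
          (fun _ => PySem.List.pyRepeat [(0 : Int)] ((N : Int) + 1))) a b = 0) := by
  rw [pyRange_zero_len]
  have hrep : PySem.List.pyRepeat [(0:Int)] ((N : Int) + 1) = List.replicate (N+1) (0:Int) := by
    have h1 : ((N:Int)+1).toNat = N+1 := by omega
    rw [PySem.List.pyRepeat_singleton, h1]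
  rw [hrep]
  refine ⟨⟨by simp, ?_⟩, ?_⟩
  · intro row hrow
    simp only [List.mem_map] at hrow
    obtain ⟨x, _, hx⟩ := hrow
    simp [← hx]
  · intro a b
    unfold dpGet
    rcases pyGetD_default_or_mem ((List.map (Nat.cast : Nat → Int) (List.range (N+1))).map
        (fun _ => List.replicate (N+1) (0:Int))) a [] with h | h
    · rw [h]
      rcases pyGetD_default_or_mem ([] : List Int) b 0 with h2 | h2
      · exact h2
      · simp at h2
    · simp only [List.mem_map] at h
      obtain ⟨x, _, hx⟩ := h
      rw [← hx]
      rcases pyGetD_default_or_mem (List.replicate (N+1) (0:Int)) b 0 with h2 | h2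
      · exact h2
      · exact List.eq_of_mem_replicate h2

lemma solution_alt_eq_g (cookie : List Int) :
    solution_alt cookie = gDp (preS cookie) 1 (cookie.length : Int) := by
  obtain ⟨hsh, hcell⟩ := initB_props cookie.length
  simp only [solution_alt]
  by_cases hN : cookie.length = 0
  · rw [hN]
    rw [if_neg (by norm_num)]
    rw [gDp_base _ (by norm_num)]
  · rw [if_pos (by omega)]
    have houter := outer_ok (preS cookie) cookie.length (((cookie.length : Int) + 1) - 2).toNat 2 _
      rfl le_rfl hsh
      (by
        intro a b ha1 haN hb1 hbN
        rw [hcell a b]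
        split_ifs with hc
        · exact (gDp_base _ (by omega)).symm
        · rfl)
    rw [(houter.2) 1 (cookie.length : Int) le_rfl (by omega) (by omega) le_rfl]
    rw [if_pos (by omega)]

-- ===== VERDICT (by name: the statement is the Claim_ definition above) =====
theorem solution_spec : Claim_equal_solution := by
  intro cookie _
  unfold Spec_solution
  rw [solution_eq_g, solution_alt_eq_g]
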